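-- pv_equiv track=rewrite | github.com/AbdelouahabLAMZOUKI/pronunciation-quiz | generate_words.py | get_syllables
-- ===== SOURCE A (Python) =====
-- def get_syllables(pron):
--     syllables = []
--     current = ''
--     vowels = ['A', 'E', 'I', 'O', 'U']
--
--     for p in pron:
--         current += p + ' '
--         if any(v in p for v in vowels):
--             syllables.append(current.strip())
--             current = ''
--
--     if current:
--         syllables.append(current.strip())
--
--     return syllables
-- ===== SOURCE B (Python) =====
-- def get_syllables(pron):
--     def has_vowel(p):
--         return any(v in p for v in 'AEIOU')
--
--     syllables = []
--     rest = pron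
--     while rest:
--         k = next((i for i, p in enumerate(rest) if has_vowel(p)), None)
--         if k is None:
--             syllables.append(' '.join(rest).strip())
--             break
--         syllables.append(' '.join(rest[:k + 1]).strip())
--         rest = rest[k + 1:]
--     return syllables
-- ===== Notes on version B (the rewrite author's own statement) =====
-- stated objective: alternative
-- what changed: A builds each syllable character-by-character in a string accumulator flushed on every vowel phoneme; B instead finds the index of the next vowel-bearing phoneme, joins-and-strips that whole chunk at once, and iterates on the remaining slice.
import Mathlib
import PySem

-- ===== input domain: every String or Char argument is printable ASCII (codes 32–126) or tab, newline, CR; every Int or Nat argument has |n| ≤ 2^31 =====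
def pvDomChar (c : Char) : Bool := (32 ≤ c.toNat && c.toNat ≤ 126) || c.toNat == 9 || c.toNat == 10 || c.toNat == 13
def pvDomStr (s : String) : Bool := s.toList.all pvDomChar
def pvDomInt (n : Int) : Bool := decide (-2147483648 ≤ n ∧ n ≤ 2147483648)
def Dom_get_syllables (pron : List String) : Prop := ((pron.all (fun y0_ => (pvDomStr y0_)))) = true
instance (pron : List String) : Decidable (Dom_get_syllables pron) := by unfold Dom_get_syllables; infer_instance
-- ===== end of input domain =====

-- B replaces A's phoneme-by-phoneme string accumulator by a chunking loop: find the index of the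
-- next vowel-bearing phoneme, join-and-strip that whole chunk at once, continue on the remainder
-- (objective: alternative decomposition, same O(n) cost).

-- ===== PORT A =====
-- 'any(v in p for v in vowels)' with vowels = ['A','E','I','O','U']
def pvHasVowelA (p : String) : Bool :=
  (["A", "E", "I", "O", "U"] : List String).any (fun v => PySem.Str.isIn v p)

-- A's for-loop over the state (syllables, current); the trailing 'if current:' is the base case
def pvLoopA (pron : List String) (syllables : List String) (current : String) : List String :=
  match pron with
  | [] => if current ≠ "" then syllables ++ [PySem.Str.strip current] else syllables
  | p :: rest =>
    let current' := current ++ p ++ " "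
    if pvHasVowelA p then pvLoopA rest (syllables ++ [PySem.Str.strip current']) ""
    else pvLoopA rest syllables current'

def get_syllables (pron : List String) : List String := pvLoopA pron [] ""

-- ===== PORT B =====
-- B's helper has_vowel: 'any(v in p for v in "AEIOU")' (v iterates the chars as 1-char strings)
def pvHasVowelB (p : String) : Bool :=
  ("AEIOU".toList).any (fun v => PySem.Chars.isIn [v] p.toList)

-- B's while-loop: rest shrinks chunk by chunk; 'next((i for i,p in enumerate(rest) if has_vowel(p)), None)'
-- is List.findIdx?; rest[:k+1] / rest[k+1:] are List.take / List.drop (exact for these nonnegative bounds).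
def pvLoopB (rest : List String) (syllables : List String) : List String :=
  match rest with
  | [] => syllables
  | p :: rest' =>
    match (p :: rest').findIdx? pvHasVowelB with
    | none => syllables ++ [PySem.Str.strip (PySem.Str.join " " (p :: rest'))]
    | some k =>
        pvLoopB ((p :: rest').drop (k + 1))
                (syllables ++ [PySem.Str.strip (PySem.Str.join " " ((p :: rest').take (k + 1)))])
termination_by rest.length
decreasing_by simp

def get_syllables_alt (pron : List String) : List String := pvLoopB pron []

-- ===== PRECONDITION & SPEC =====
def Spec_get_syllables (pron : List String) (out : List String) : Prop := out = get_syllables_alt pron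
instance (pron : List String) (out : List String) : Decidable (Spec_get_syllables pron out) := by unfold Spec_get_syllables; infer_instance

-- ===== CLAIM (what is proved, stated in full; the proofs are below) =====
def Claim_equal_get_syllables : Prop := ∀ (pron : List String), Dom_get_syllables pron → Spec_get_syllables pron (get_syllables pron)

-- ===== LEMMAS AND PROOFS =====

theorem hasVowel_eq (p : String) : pvHasVowelA p = pvHasVowelB p := by
  simp [pvHasVowelA, pvHasVowelB, PySem.Str.isIn]

-- A's accumulator 'current' over a run of phonemes, and its character-level value
def pvAcc (cur : String) (ps : List String) : String := ps.foldl (fun c p => c ++ p ++ " ") cur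
def pvJL (ps : List String) : List Char := (ps.map (fun p => p.toList ++ [' '])).flatten

theorem toList_pvAcc (ps : List String) : ∀ cur : String, (pvAcc cur ps).toList = cur.toList ++ pvJL ps := by
  induction ps with
  | nil => simp [pvAcc, pvJL]
  | cons p t ih => intro cur; simp [pvAcc, List.foldl_cons, pvJL] at *; simp [ih, String.toList_append]

theorem pvJL_join (ps : List String) (h : ps ≠ []) :
    pvJL ps = PySem.Chars.join [' '] (ps.map String.toList) ++ [' '] := by
  induction ps with
  | nil => simp at h
  | cons p t ih =>
    cases t with
    | nil => simp [pvJL, PySem.Chars.join_singleton]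
    | cons q u =>
      simp only [pvJL, List.map_cons, List.flatten_cons] at *
      rw [ih (by simp)]
      rw [PySem.Chars.join_cons_cons]
      simp

theorem rstrip_append_space (x : List Char) :
    PySem.Chars.rstrip (x ++ [' ']) = PySem.Chars.rstrip x := by
  simp [PySem.Chars.rstrip, show PySem.Chars.isspace ' ' = true from by decide]

theorem strip_append_space (l : List Char) :
    PySem.Chars.strip (l ++ [' ']) = PySem.Chars.strip l := by
  simp only [PySem.Chars.strip, PySem.Chars.lstrip, List.dropWhile_append]
  by_cases h : (List.dropWhile PySem.Chars.isspace l).isEmpty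
  · simp [show PySem.Chars.isspace ' ' = true from by decide,
      PySem.Chars.rstrip, List.isEmpty_iff.mp h]
  · simp [h, rstrip_append_space]

-- the central fact: A's accumulated chunk strips to the same string as B's ' '.join of the chunk
theorem strip_JL (s : String) (ps : List String) (h : ps ≠ []) (hs : s.toList = pvJL ps) :
    PySem.Str.strip s = PySem.Str.strip (PySem.Str.join " " ps) := by
  simp only [PySem.Str.strip, PySem.Str.toList_join]
  congr 1
  rw [hs, pvJL_join ps h, show (" " : String).toList = [' '] from by decide, strip_append_space]

theorem pvAcc_ne_empty (p : String) (t : List String) : pvAcc "" (p :: t) ≠ "" := by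
  intro hc
  have := congrArg String.toList hc
  rw [toList_pvAcc] at this
  simp [pvJL] at this

theorem loopA_prefix (ps : List String) : ∀ (rest syl : List String) (cur : String),
    (∀ p ∈ ps, pvHasVowelA p = false) → pvLoopA (ps ++ rest) syl cur = pvLoopA rest syl (pvAcc cur ps) := by
  induction ps with
  | nil => intro rest syl cur _; simp [pvAcc]
  | cons p t ih =>
    intro rest syl cur hnv
    simp only [List.cons_append, pvLoopA, hnv p (by simp)]
    rw [ih rest syl (cur ++ p ++ " ") (fun q hq => hnv q (by simp [hq]))]
    simp [pvAcc]

theorem toList_space : (" " : String).toList = [' '] := by decide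
theorem toList_emptyStr : ("" : String).toList = [] := by decide
theorem pvJL_append_singleton (xs : List String) (x : String) :
    pvJL (xs ++ [x]) = pvJL xs ++ (x.toList ++ [' ']) := by simp [pvJL]

theorem main_loop_eq : ∀ (pron syl : List String), pvLoopA pron syl "" = pvLoopB pron syl := by
  intro pron syl
  induction pron, syl using pvLoopB.induct with
  | case1 syl => simp [pvLoopA, pvLoopB]
  | case2 syl p rest' hk =>
    rw [pvLoopB]
    simp only [hk]
    have hall : ∀ q ∈ (p :: rest'), pvHasVowelA q = false := by
      intro q hq; rw [hasVowel_eq]; exact List.findIdx?_eq_none_iff.mp hk q hq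
    have h1 := loopA_prefix (p :: rest') [] syl "" hall
    simp only [List.append_nil] at h1
    rw [h1, pvLoopA, if_pos (pvAcc_ne_empty p rest')]
    rw [strip_JL (pvAcc "" (p :: rest')) (p :: rest') (by simp) (by rw [toList_pvAcc]; simp)]
  | case3 syl p rest' k hk ih =>
    rw [pvLoopB]
    simp only [hk]
    obtain ⟨hlt, hv, hprev⟩ := List.findIdx?_eq_some_iff_getElem.mp hk
    have hdecomp : (p :: rest') = (p :: rest').take k ++ ((p :: rest')[k] :: (p :: rest').drop (k + 1)) := by
      conv_lhs => rw [← List.take_append_drop k (p :: rest')]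
      rw [List.drop_eq_getElem_cons hlt]
    have htake : (p :: rest').take (k + 1) = (p :: rest').take k ++ [(p :: rest')[k]] := by
      rw [List.take_add_one]
      simp [List.getElem?_eq_getElem hlt]
    have hnv : ∀ q ∈ (p :: rest').take k, pvHasVowelA q = false := by
      intro q hq
      obtain ⟨j, hj, hje⟩ := List.mem_iff_getElem.mp hq
      have hjk : j < k := lt_of_lt_of_le hj (by simp [List.length_take])
      rw [← hje, List.getElem_take, hasVowel_eq]
      exact Bool.eq_false_iff.mpr (hprev j hjk)
    have hs : (pvAcc "" ((p :: rest').take k) ++ (p :: rest')[k] ++ " ").toList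
        = pvJL ((p :: rest').take (k + 1)) := by
      rw [htake, pvJL_append_singleton]
      simp only [String.toList_append, toList_pvAcc, toList_space, toList_emptyStr]
      simp
    calc pvLoopA (p :: rest') syl ""
        = pvLoopA ((p :: rest').take k ++ ((p :: rest')[k] :: (p :: rest').drop (k + 1))) syl "" := by
          rw [← hdecomp]
      _ = pvLoopA ((p :: rest')[k] :: (p :: rest').drop (k + 1)) syl (pvAcc "" ((p :: rest').take k)) := by
          rw [loopA_prefix _ _ _ _ hnv]
      _ = pvLoopA ((p :: rest').drop (k + 1))
            (syl ++ [PySem.Str.strip (pvAcc "" ((p :: rest').take k) ++ (p :: rest')[k] ++ " ")]) "" := by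
          rw [pvLoopA]
          simp only [hasVowel_eq]
          rw [if_pos hv]
      _ = pvLoopB ((p :: rest').drop (k + 1))
            (syl ++ [PySem.Str.strip (PySem.Str.join " " ((p :: rest').take (k + 1)))]) := by
          rw [strip_JL _ _ (by rw [htake]; simp) hs]
          exact ih

-- ===== VERDICT (by name: the statement is the Claim_ definition above) =====
theorem get_syllables_spec : Claim_equal_get_syllables := by
  intro pron _
  unfold Spec_get_syllables get_syllables get_syllables_alt
  exact main_loop_eq pron []
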